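-- pv_equiv track=rewrite | github.com/cdwaipayan/PaSSion | monte_carlo/aux/structural_analysis/tetrahedra_counting/trig.py | getNeighboursOfI
-- ===== SOURCE A (Python) =====
-- def getNeighboursOfI(npart,bonds):
--     neighboursofi = []
--     for part in range(npart):
--         ilist = []
--         for bond in bonds:
--             if(bond[0] == part):
--                 ilist.append(bond[1])
--             elif (bond[1] == part):
--                 ilist.append(bond[0])
--         ilist.sort()
--         neighboursofi.append(ilist)
--     return neighboursofi
-- ===== SOURCE B (Python) =====
-- def getNeighboursOfI(npart, bonds):
--     # One pass over the bonds, bucketing each endpoint into its particle's list.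
--     buckets = [[] for _ in range(npart)]
--     for bond in bonds:
--         a, b = bond[0], bond[1]
--         if 0 <= a < npart:
--             buckets[a].append(b)
--         if b != a and 0 <= b < npart:
--             buckets[b].append(a)
--     for l in buckets:
--         l.sort()
--     return buckets
-- ===== Notes on version B (the rewrite author's own statement) =====
-- stated objective: faster
-- what changed: Replaces the per-particle scan of all bonds (npart passes over bonds) by a single pass that buckets each bond's endpoints into per-particle lists, then sorts each bucket.
-- outside the precondition, e.g. on getNeighboursOfI(0, [(1,)]): A returns [], B raises IndexError
import Mathlib
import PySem

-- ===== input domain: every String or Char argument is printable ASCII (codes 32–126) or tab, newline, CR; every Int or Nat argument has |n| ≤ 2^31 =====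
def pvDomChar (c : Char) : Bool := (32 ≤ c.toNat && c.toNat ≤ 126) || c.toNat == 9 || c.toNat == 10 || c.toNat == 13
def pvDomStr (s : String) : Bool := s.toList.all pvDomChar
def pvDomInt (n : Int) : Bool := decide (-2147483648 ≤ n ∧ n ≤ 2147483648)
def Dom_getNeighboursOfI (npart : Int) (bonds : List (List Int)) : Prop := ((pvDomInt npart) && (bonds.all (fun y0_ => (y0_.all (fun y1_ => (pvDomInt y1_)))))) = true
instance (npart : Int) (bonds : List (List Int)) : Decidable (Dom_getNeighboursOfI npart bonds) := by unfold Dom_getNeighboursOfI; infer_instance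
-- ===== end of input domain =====

-- B buckets each bond's two endpoints into per-particle lists in ONE pass over bonds, then
-- sorts each bucket — instead of A's rescanning of the whole bond list once per particle.

-- ===== PORT A =====
-- body of A's inner loop over bonds for particle `part`
-- (bond[0] / bond[1] via pyGetD: under Pre_ every bond has length ≥ 2, so the default is never read)
def pvStepA (part : Int) (il : List Int) (bond : List Int) : List Int :=
  if PySem.List.pyGetD bond 0 0 == part then il ++ [PySem.List.pyGetD bond 1 0]
  else if PySem.List.pyGetD bond 1 0 == part then il ++ [PySem.List.pyGetD bond 0 0]
  else il

-- A's inner loop: collect the neighbours of `part` by scanning all bonds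
def pvCollect (bonds : List (List Int)) (part : Int) : List Int :=
  bonds.foldl (pvStepA part) []

def getNeighboursOfI (npart : Int) (bonds : List (List Int)) : List (List Int) :=
  (PySem.List.pyRange 0 npart 1).foldl
    (fun neighboursofi part =>
      neighboursofi ++ [PySem.List.sorted (pvCollect bonds part) (fun x => x) false]) []

-- ===== PORT B =====
-- one bond step of B: append each endpoint's partner to that endpoint's bucket
def pvBStep (npart : Int) (buckets : List (List Int)) (bond : List Int) : List (List Int) :=
  let a := PySem.List.pyGetD bond 0 0
  let b := PySem.List.pyGetD bond 1 0
  let bk := if 0 ≤ a ∧ a < npart then buckets.modify a.toNat (· ++ [b]) else buckets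
  if b ≠ a ∧ 0 ≤ b ∧ b < npart then bk.modify b.toNat (· ++ [a]) else bk

def getNeighboursOfI_alt (npart : Int) (bonds : List (List Int)) : List (List Int) :=
  (bonds.foldl (pvBStep npart) ((PySem.List.pyRange 0 npart 1).map (fun _ => ([] : List Int)))).map
    (fun l => PySem.List.sorted l (fun x => x) false)

-- ===== PRECONDITION & SPEC =====
-- Pre_ excludes inputs with a bond of length < 2: there Python A raises IndexError whenever
-- npart > 0, and when npart ≤ 0 (A returns []) B itself raises reading both endpoints.
def Pre_getNeighboursOfI (npart : Int) (bonds : List (List Int)) : Prop :=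
  (bonds.all (fun bond => decide (2 ≤ bond.length))) = true
instance (npart : Int) (bonds : List (List Int)) : Decidable (Pre_getNeighboursOfI npart bonds) := by unfold Pre_getNeighboursOfI; infer_instance
def pvWitness_getNeighboursOfI : Int × List (List Int) := (3, [[0, 1], [1, 2]])

def Spec_getNeighboursOfI (npart : Int) (bonds : List (List Int)) (out : List (List Int)) : Prop := out = getNeighboursOfI_alt npart bonds
instance (npart : Int) (bonds : List (List Int)) (out : List (List Int)) : Decidable (Spec_getNeighboursOfI npart bonds out) := by unfold Spec_getNeighboursOfI; infer_instance

-- ===== CLAIM (what is proved, stated in full; the proofs are below) =====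
def Claim_equal_getNeighboursOfI : Prop := ∀ (npart : Int) (bonds : List (List Int)), Dom_getNeighboursOfI npart bonds → Pre_getNeighboursOfI npart bonds → Spec_getNeighboursOfI npart bonds (getNeighboursOfI npart bonds)

-- ===== LEMMAS AND PROOFS =====

lemma pvStepA_shift (part : Int) (il : List Int) (bond : List Int) :
    pvStepA part il bond = il ++ pvStepA part [] bond := by
  simp only [pvStepA]
  split_ifs <;> simp

lemma pvCollect_init (bonds : List (List Int)) (part : Int) (il : List Int) :
    bonds.foldl (pvStepA part) il = il ++ pvCollect bonds part := by
  induction bonds generalizing il with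
  | nil => simp [pvCollect]
  | cons bond rest ih =>
      simp only [pvCollect, List.foldl_cons]
      rw [ih, ih (pvStepA part [] bond), ← List.append_assoc, ← pvStepA_shift]

lemma pvCollect_cons (bond : List Int) (rest : List (List Int)) (part : Int) :
    pvCollect (bond :: rest) part = pvStepA part [] bond ++ pvCollect rest part := by
  simp only [pvCollect, List.foldl_cons]
  exact pvCollect_init rest part _

lemma pvModify_getElem?_hit {α : Type} (l : List α) (k i : Nat) (h : k = i) (f : α → α) :
    (l.modify k f)[i]? = f <$> l[i]? := by
  rw [List.getElem?_modify]
  cases l[i]? <;> simp [h]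

lemma pvModify_getElem?_miss {α : Type} (l : List α) (k i : Nat) (h : k ≠ i) (f : α → α) :
    (l.modify k f)[i]? = l[i]? := by
  rw [List.getElem?_modify]
  cases l[i]? <;> simp [h]

lemma pvBStep_length (npart : Int) (buckets : List (List Int)) (bond : List Int) :
    (pvBStep npart buckets bond).length = buckets.length := by
  simp only [pvBStep]
  split_ifs <;> simp

lemma pvBfold_length (npart : Int) (bonds : List (List Int)) (buckets : List (List Int)) :
    (bonds.foldl (pvBStep npart) buckets).length = buckets.length := by
  induction bonds generalizing buckets with
  | nil => rfl
  | cons bond rest ih => rw [List.foldl_cons, ih, pvBStep_length]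

lemma pvBStep_getElem? (npart : Int) (buckets : List (List Int)) (bond : List Int)
    (i : Nat) (hi : (i : Int) < npart) :
    (pvBStep npart buckets bond)[i]? = (buckets[i]?).map (· ++ pvStepA (i : Int) [] bond) := by
  simp only [pvBStep]
  set a := PySem.List.pyGetD bond 0 0 with ha
  set b := PySem.List.pyGetD bond 1 0 with hb
  by_cases hai : a = (i : Int)
  · have hh : pvStepA (i : Int) [] bond = [b] := by
      simp [pvStepA, ← ha, ← hb, hai]
    have h1 : 0 ≤ a ∧ a < npart := by omega
    rw [if_pos h1]
    by_cases h2 : b ≠ a ∧ 0 ≤ b ∧ b < npart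
    · rw [if_pos h2, pvModify_getElem?_miss _ _ _ (by omega), pvModify_getElem?_hit _ _ _ (by omega)]
      cases buckets[i]? <;> simp [hh]
    · rw [if_neg h2, pvModify_getElem?_hit _ _ _ (by omega)]
      cases buckets[i]? <;> simp [hh]
  · by_cases hbi : b = (i : Int)
    · have hh : pvStepA (i : Int) [] bond = [a] := by
        simp [pvStepA, ← ha, ← hb, hai, hbi]
      have h2 : b ≠ a ∧ 0 ≤ b ∧ b < npart := ⟨by omega, by omega, by omega⟩
      rw [if_pos h2]
      by_cases h1 : 0 ≤ a ∧ a < npart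
      · rw [if_pos h1, pvModify_getElem?_hit _ _ _ (by omega), pvModify_getElem?_miss _ _ _ (by omega)]
        cases buckets[i]? <;> simp [hh]
      · rw [if_neg h1, pvModify_getElem?_hit _ _ _ (by omega)]
        cases buckets[i]? <;> simp [hh]
    · have hh : pvStepA (i : Int) [] bond = [] := by
        simp [pvStepA, ← ha, ← hb, hai, hbi]
      by_cases h2 : b ≠ a ∧ 0 ≤ b ∧ b < npart
      · rw [if_pos h2, pvModify_getElem?_miss _ _ _ (by omega)]
        by_cases h1 : 0 ≤ a ∧ a < npart
        · rw [if_pos h1, pvModify_getElem?_miss _ _ _ (by omega)]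
          cases buckets[i]? <;> simp [hh]
        · rw [if_neg h1]
          cases buckets[i]? <;> simp [hh]
      · rw [if_neg h2]
        by_cases h1 : 0 ≤ a ∧ a < npart
        · rw [if_pos h1, pvModify_getElem?_miss _ _ _ (by omega)]
          cases buckets[i]? <;> simp [hh]
        · rw [if_neg h1]
          cases buckets[i]? <;> simp [hh]

lemma pvBfold_getElem? (npart : Int) (bonds : List (List Int)) (buckets : List (List Int))
    (i : Nat) (hi : (i : Int) < npart) :
    (bonds.foldl (pvBStep npart) buckets)[i]? = (buckets[i]?).map (· ++ pvCollect bonds (i : Int)) := by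
  induction bonds generalizing buckets with
  | nil =>
      simp only [List.foldl_nil, pvCollect, List.foldl_nil]
      cases buckets[i]? <;> simp
  | cons bond rest ih =>
      rw [List.foldl_cons, ih, pvBStep_getElem? npart buckets bond i hi, pvCollect_cons]
      cases buckets[i]? <;> simp

-- ===== VERDICT (by name: the statement is the Claim_ definition above) =====
theorem getNeighboursOfI_spec : Claim_equal_getNeighboursOfI := by
  intro npart bonds _ _
  unfold Spec_getNeighboursOfI getNeighboursOfI getNeighboursOfI_alt
  rw [PySem.List.foldl_append_singleton_eq_map, List.nil_append]
  have hA : ((PySem.List.pyRange 0 npart 1).map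
      (fun part => PySem.List.sorted (pvCollect bonds part) (fun x => x) false)).length = npart.toNat := by
    rw [List.length_map, PySem.List.length_pyRange_one]
    omega
  have hB0 : ((PySem.List.pyRange 0 npart 1).map (fun _ => ([] : List Int))).length = npart.toNat := by
    rw [List.length_map, PySem.List.length_pyRange_one]
    omega
  apply List.ext_getElem?
  intro i
  by_cases hi : i < npart.toNat
  · rw [List.getElem?_map, List.getElem?_map, pvBfold_getElem? npart bonds _ i (by omega)]
    rw [List.getElem?_eq_getElem (by omega : i < ((PySem.List.pyRange 0 npart 1).map (fun _ => ([] : List Int))).length)]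
    rw [List.getElem?_eq_getElem (by rw [PySem.List.length_pyRange_one]; omega : i < (PySem.List.pyRange 0 npart 1).length)]
    simp only [List.getElem_map, PySem.List.getElem_pyRange_one, Option.map_some]
    simp
  · rw [List.getElem?_eq_none (by omega : ((PySem.List.pyRange 0 npart 1).map
      (fun part => PySem.List.sorted (pvCollect bonds part) (fun x => x) false)).length ≤ i)]
    rw [List.getElem?_eq_none]
    rw [List.length_map, pvBfold_length]
    omega
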